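-- pv_equiv track=rewrite | github.com/alyshareinard/Advent-of-Code-2020 | day10.py | adaptor_combs
-- ===== SOURCE A (Python) =====
-- def adaptor_combs(adaptors):
--     adaptors.append(0)
--     adaptors.append(max(adaptors)+3)
--     adaptors.sort()
--     diffs = []
--
--     for i in range(1, len(adaptors)):
--         diffs.append(adaptors[i] - adaptors[i-1])
--
--     threes = diffs.count(3)
--     ones = diffs.count(1)
--     return(threes*ones)
-- ===== SOURCE B (Python) =====
-- def adaptor_combs(adaptors):
--     # Same observable mutations as the original: append 0, append max+3, sort in place.
--     adaptors.append(0)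
--     adaptors.append(max(adaptors) + 3)
--     adaptors.sort()
--     # Count gaps by SET MEMBERSHIP instead of scanning adjacent pairs:
--     # among distinct values, v ends a gap of 1 iff v-1 is present; v ends a gap
--     # of 3 iff v-3 is present while v-2 and v-1 are not (duplicates give 0-gaps).
--     present = set(adaptors)
--     ones = sum(1 for v in present if v - 1 in present)
--     threes = sum(1 for v in present
--                  if v - 3 in present and v - 2 not in present and v - 1 not in present)
--     return threes * ones
-- ===== Notes on version B (the rewrite author's own statement) =====
-- stated objective: alternative
-- what changed: Replaces A's sorted adjacent-difference list with two .count scans by membership counting over the set of values: a distinct value v ends a 1-gap iff v-1 is present, and a 3-gap iff v-3 is present while v-2 and v-1 are not.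
import Mathlib
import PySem

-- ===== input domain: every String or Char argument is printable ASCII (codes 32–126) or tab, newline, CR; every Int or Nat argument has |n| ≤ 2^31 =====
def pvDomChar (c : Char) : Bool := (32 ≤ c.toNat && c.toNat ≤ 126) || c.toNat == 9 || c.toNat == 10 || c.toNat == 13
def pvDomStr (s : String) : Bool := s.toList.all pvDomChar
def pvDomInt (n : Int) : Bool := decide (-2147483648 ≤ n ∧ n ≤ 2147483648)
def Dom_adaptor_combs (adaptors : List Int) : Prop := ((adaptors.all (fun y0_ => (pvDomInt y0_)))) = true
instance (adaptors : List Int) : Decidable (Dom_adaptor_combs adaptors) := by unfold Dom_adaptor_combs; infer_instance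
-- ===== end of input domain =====

-- B counts gaps by set membership over the distinct values (v ends a 1-gap iff v-1 is
-- present; a 3-gap iff v-3 is present and v-2, v-1 are not) instead of A's sorted
-- adjacent-difference list with two .count scans; both mutate the argument identically
-- (append 0, append max+3, sort) — the equivalence proved here is about the return value.


-- ===== PORT A =====
-- adaptors.append(0); adaptors.append(max(adaptors)+3); adaptors.sort();
-- diffs built by an index loop; return diffs.count(3) * diffs.count(1).
-- a1 is nonempty, so max? is some and getD 0 is exact; loop indices are in range, so pyGetD 0 is exact.
def adaptor_combs (adaptors : List Int) : Int :=
  let a1 := adaptors ++ [0]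
  let m := (PySem.List.max? a1 (fun y => y)).getD 0
  let a2 := a1 ++ [m + 3]
  let s := PySem.List.sorted a2 (fun y => y) false
  let diffs := (PySem.List.pyRange 1 (s.length : Int) 1).foldl
      (fun acc i => acc ++ [PySem.List.pyGetD s i 0 - PySem.List.pyGetD s (i - 1) 0]) []
  (diffs.count 3 : Int) * (diffs.count 1 : Int)

-- ===== PORT B =====
-- same mutations, then a set of the values and two membership counts
-- (the sums are counts, so they do not depend on the set's iteration order).
def adaptor_combs_alt (adaptors : List Int) : Int :=
  let a1 := adaptors ++ [0]
  let m := (PySem.List.max? a1 (fun y => y)).getD 0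
  let s := PySem.List.sorted (a1 ++ [m + 3]) (fun y => y) false
  let present := PySem.Set.ofList s
  let ones : Int := (present.countP (fun v => PySem.Set.contains present (v - 1)) : Int)
  let threes : Int := (present.countP (fun v =>
      PySem.Set.contains present (v - 3) && !PySem.Set.contains present (v - 2)
        && !PySem.Set.contains present (v - 1)) : Int)
  threes * ones

-- ===== PRECONDITION & SPEC =====
def Spec_adaptor_combs (adaptors : List Int) (out : Int) : Prop := out = adaptor_combs_alt adaptors
instance (adaptors : List Int) (out : Int) : Decidable (Spec_adaptor_combs adaptors out) := by unfold Spec_adaptor_combs; infer_instance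

-- ===== CLAIM (what is proved, stated in full; the proofs are below) =====
def Claim_equal_adaptor_combs : Prop := ∀ (adaptors : List Int), Dom_adaptor_combs adaptors → Spec_adaptor_combs adaptors (adaptor_combs adaptors)

-- ===== LEMMAS AND PROOFS =====

-- number of adjacent pairs of l at distance k
def pvAdjCount (k : Int) (l : List Int) : Nat :=
  ((l.zip l.tail).map (fun ab => ab.2 - ab.1)).count k

-- collapse equal neighbours of a (sorted) list, keeping one of each run
def pvSD : List Int → List Int
  | [] => []
  | [a] => [a]
  | a :: b :: t => if a = b then pvSD (b :: t) else a :: pvSD (b :: t)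

-- A's index loop builds exactly the adjacent-difference list of s.
theorem diffs_eq_zip (s : List Int) :
    (PySem.List.pyRange 1 (s.length : Int) 1).foldl
      (fun acc i => acc ++ [PySem.List.pyGetD s i 0 - PySem.List.pyGetD s (i - 1) 0]) []
    = (s.zip s.tail).map (fun ab => ab.2 - ab.1) := by
  rw [PySem.List.pyRange_one, List.foldl_map, PySem.List.foldl_append_singleton_eq_map]
  apply List.ext_getElem
  · simp only [List.nil_append, List.length_map, List.length_range, List.length_zip, List.length_tail]
    omega
  · intro i h1 h2
    have hlen : i + 1 < s.length := by
      simp [List.length_zip] at h2; omega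
    simp only [List.nil_append, List.getElem_map, List.getElem_range, List.getElem_zip, List.getElem_tail]
    rw [PySem.List.pyGetD_eq_getElem s 0 (by omega) (by omega),
        PySem.List.pyGetD_eq_getElem s 0 (by omega) (by omega)]
    have e1 : ((1 : Int) + (i : Int)).toNat = i + 1 := by omega
    simp [e1]

theorem pvSD_head (b : Int) (t : List Int) : ∃ t', pvSD (b :: t) = b :: t' := by
  induction t generalizing b with
  | nil => exact ⟨[], rfl⟩
  | cons c t ih =>
    by_cases h : b = c
    · obtain ⟨t', ht'⟩ := ih c
      exact ⟨t', by subst h; simp [pvSD, ht']⟩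
    · exact ⟨pvSD (c :: t), by simp [pvSD, h]⟩

theorem pvSD_mem (l : List Int) (x : Int) : x ∈ pvSD l ↔ x ∈ l := by
  induction l with
  | nil => simp [pvSD]
  | cons a l ih =>
    cases l with
    | nil => simp [pvSD]
    | cons b t =>
      by_cases h : a = b
      · simp [pvSD, h, ih]
      · simp [pvSD, h, ih]

theorem pvSD_pairwise_lt (l : List Int) (h : l.Pairwise (· ≤ ·)) :
    (pvSD l).Pairwise (· < ·) := by
  induction l with
  | nil => simp [pvSD]
  | cons a l ih =>
    cases l with
    | nil => simp [pvSD]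
    | cons b t =>
      rw [List.pairwise_cons] at h
      by_cases hab : a = b
      · simpa [pvSD, hab] using ih h.2
      · have ha : ∀ x ∈ pvSD (b :: t), a < x := by
          intro x hx
          rw [pvSD_mem] at hx
          have hbx : b ≤ x := by
            rcases List.mem_cons.mp hx with rfl | hx'
            · exact le_refl x
            · exact (List.pairwise_cons.mp h.2).1 x hx'
          have hax : a ≤ b := h.1 b (by simp)
          omega
        simpa [pvSD, hab] using List.pairwise_cons.mpr ⟨ha, ih h.2⟩

theorem pvBoolify (X Y Z : Prop) [Decidable X] [Decidable Y] [Decidable Z] :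
    (decide X && !decide Y && !decide Z) = decide (X ∧ ¬Y ∧ ¬Z) := by
  by_cases hx : X <;> by_cases hy : Y <;> by_cases hz : Z <;> simp [hx, hy, hz]

theorem pvAdjCount_cons (k a b : Int) (t : List Int) :
    pvAdjCount k (a :: b :: t) = (if b - a = k then 1 else 0) + pvAdjCount k (b :: t) := by
  by_cases h : b - a = k
  · simp [pvAdjCount, h]
    omega
  · simp [pvAdjCount, h]


theorem pvAdjCount_pvSD (k : Int) (hk : k ≠ 0) (l : List Int) (h : l.Pairwise (· ≤ ·)) :
    pvAdjCount k l = pvAdjCount k (pvSD l) := by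
  induction l with
  | nil => rfl
  | cons a l ih =>
    cases l with
    | nil => rfl
    | cons b t =>
      rw [List.pairwise_cons] at h
      have ihr := ih h.2
      by_cases hab : a = b
      · subst hab
        rw [pvAdjCount_cons, if_neg (by omega), ihr]
        simp [pvSD]
      · obtain ⟨t', ht'⟩ := pvSD_head b t
        rw [pvAdjCount_cons]
        simp only [pvSD, hab, if_false]
        rw [ht', pvAdjCount_cons, ← ht', ihr]

theorem pvCount_one (e : List Int) (h : e.Pairwise (· < ·)) :
    pvAdjCount 1 e = e.countP (fun v => decide ((v - 1) ∈ e)) := by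
  induction e with
  | nil => rfl
  | cons a r ih =>
    rw [List.pairwise_cons] at h
    cases r with
    | nil => simp [pvAdjCount]
    | cons b t =>
      have hab : a < b := h.1 b (by simp)
      have hbt : ∀ x ∈ t, b < x := (List.pairwise_cons.mp h.2).1
      rw [pvAdjCount_cons, ih h.2]
      -- head a never counts: a - 1 < every element
      have hha : ¬ (a - 1 ∈ a :: b :: t) := by
        intro hmem
        rcases List.mem_cons.mp hmem with h1 | hmem
        · omega
        · rcases List.mem_cons.mp hmem with h1 | h1
          · omega
          · have := hbt _ h1; omega
      -- b counts in the big list iff b - a = 1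
      have hb : ((b - 1) ∈ a :: b :: t) ↔ b - a = 1 := by
        constructor
        · intro hmem
          rcases List.mem_cons.mp hmem with h1 | hmem
          · omega
          · rcases List.mem_cons.mp hmem with h1 | h1
            · omega
            · have := hbt _ h1; omega
        · intro h1; simp [show b - 1 = a by omega]
      have ht : ∀ v ∈ t, ((v - 1) ∈ a :: b :: t) ↔ ((v - 1) ∈ b :: t) := by
        intro v hv
        have hbv := hbt v hv
        constructor
        · intro hmem
          rcases List.mem_cons.mp hmem with h1 | hmem
          · omega
          · exact hmem
        · intro hmem; exact List.mem_cons_of_mem a hmem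
      have hbn : ¬ ((b - 1) ∈ b :: t) := by
        intro hmem
        rcases List.mem_cons.mp hmem with h1 | h1
        · omega
        · have := hbt _ h1; omega
      have hcongr : List.countP (fun v => decide ((v - 1) ∈ a :: b :: t)) t
          = List.countP (fun v => decide ((v - 1) ∈ b :: t)) t :=
        List.countP_congr (fun v hv => by simpa using ht v hv)
      simp only [List.countP_cons]
      rw [hcongr]
      simp only [decide_eq_true_eq]
      rw [if_neg hha, if_neg hbn]
      by_cases h1 : b - a = 1
      · rw [if_pos h1, if_pos (hb.mpr h1)]
        omega
      · rw [if_neg h1, if_neg (fun hm => h1 (hb.mp hm))]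
        omega

theorem pvCount_three (e : List Int) (h : e.Pairwise (· < ·)) :
    pvAdjCount 3 e = e.countP (fun v =>
      decide ((v - 3) ∈ e) && !decide ((v - 2) ∈ e) && !decide ((v - 1) ∈ e)) := by
  induction e with
  | nil => rfl
  | cons a r ih =>
    rw [List.pairwise_cons] at h
    cases r with
    | nil => simp [pvAdjCount]
    | cons b t =>
      have hab : a < b := h.1 b (by simp)
      have hbt : ∀ x ∈ t, b < x := (List.pairwise_cons.mp h.2).1
      rw [pvAdjCount_cons, ih h.2]
      have hmem3 : ∀ (x : Int), x < a → ¬ (x ∈ a :: b :: t) := by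
        intro x hx hmem
        rcases List.mem_cons.mp hmem with h1 | hmem
        · omega
        · rcases List.mem_cons.mp hmem with h1 | h1
          · omega
          · have := hbt _ h1; omega
      have hmemr : ∀ (x : Int), x < b → ¬ (x ∈ b :: t) := by
        intro x hx hmem
        rcases List.mem_cons.mp hmem with h1 | h1
        · omega
        · have := hbt _ h1; omega
      -- the head a never counts
      have hha : ¬ ((a - 3) ∈ a :: b :: t) := hmem3 _ (by omega)
      -- b counts in the big list iff b - a = 3
      have hb : (((b - 3) ∈ a :: b :: t) ∧ ¬ ((b - 2) ∈ a :: b :: t) ∧ ¬ ((b - 1) ∈ a :: b :: t))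
          ↔ b - a = 3 := by
        constructor
        · rintro ⟨h3, h2, h1⟩
          rcases List.mem_cons.mp h3 with hx | hx
          · omega
          · rcases List.mem_cons.mp hx with hx1 | hx1
            · omega
            · have := hbt _ hx1; omega
        · intro h3
          refine ⟨by simp [show b - 3 = a by omega], ?_, ?_⟩
          · intro hm
            rcases List.mem_cons.mp hm with hx | hx
            · omega
            · exact hmemr _ (by omega) hx
          · intro hm
            rcases List.mem_cons.mp hm with hx | hx
            · omega
            · exact hmemr _ (by omega) hx
      -- on t the predicate is unchanged by dropping a
      have ht : ∀ v ∈ t,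
          (((v - 3) ∈ a :: b :: t) ∧ ¬ ((v - 2) ∈ a :: b :: t) ∧ ¬ ((v - 1) ∈ a :: b :: t))
          ↔ (((v - 3) ∈ b :: t) ∧ ¬ ((v - 2) ∈ b :: t) ∧ ¬ ((v - 1) ∈ b :: t)) := by
        intro v hv
        have hbv := hbt v hv
        have h1a : (v - 1) ≠ a := by omega
        by_cases h2a : v - 2 = a
        · -- then b = v - 1, present on both sides: both sides false
          have hb1 : b = v - 1 := by omega
          have hbl : (v - 1) ∈ b :: t := by simp [← hb1]
          constructor
          · rintro ⟨_, _, hn1⟩; exact absurd (List.mem_cons_of_mem a hbl) hn1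
          · rintro ⟨_, _, hn1⟩; exact absurd hbl hn1
        · by_cases h3a : v - 3 = a
          · -- b ∈ {v-2, v-1}; present on both sides kills the predicate; v-3 ∉ b::t
            have hbcase : b = v - 2 ∨ b = v - 1 := by omega
            have hr3 : ¬ ((v - 3) ∈ b :: t) := hmemr _ (by omega)
            constructor
            · rintro ⟨_, hn2, hn1⟩
              rcases hbcase with hb2 | hb1
              · exact absurd (List.mem_cons_of_mem a (show (v-2) ∈ b :: t by simp [← hb2])) hn2
              · exact absurd (List.mem_cons_of_mem a (show (v-1) ∈ b :: t by simp [← hb1])) hn1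
            · rintro ⟨h3, _, _⟩; exact absurd h3 hr3
          · -- a is none of v-1, v-2, v-3: memberships coincide
            simp only [List.mem_cons]
            constructor
            · rintro ⟨h3, h2, h1⟩
              refine ⟨?_, fun hm => h2 (Or.inr hm), fun hm => h1 (Or.inr hm)⟩
              rcases h3 with hx | hx
              · omega
              · exact hx
            · rintro ⟨h3, h2, h1⟩
              refine ⟨Or.inr h3, ?_, ?_⟩
              · rintro (hx | hx)
                · omega
                · exact h2 hx
              · rintro (hx | hx)
                · omega
                · exact h1 hx
      have hbn3 : ¬ ((b - 3) ∈ b :: t) := hmemr _ (by omega)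
      have hcongr : List.countP (fun v => decide ((v - 3) ∈ a :: b :: t)
            && !decide ((v - 2) ∈ a :: b :: t) && !decide ((v - 1) ∈ a :: b :: t)) t
          = List.countP (fun v => decide ((v - 3) ∈ b :: t)
            && !decide ((v - 2) ∈ b :: t) && !decide ((v - 1) ∈ b :: t)) t :=
        List.countP_congr (fun v hv => by
          rw [pvBoolify, pvBoolify, decide_eq_true_eq, decide_eq_true_eq]; exact ht v hv)
      simp only [List.countP_cons]
      rw [hcongr]
      simp only [pvBoolify, decide_eq_true_eq]
      rw [if_neg (show ¬ ((a - 3) ∈ a :: b :: t ∧ (a - 2) ∉ a :: b :: t ∧ (a - 1) ∉ a :: b :: t)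
            from fun hm => hha hm.1),
          if_neg (show ¬ ((b - 3) ∈ b :: t ∧ (b - 2) ∉ b :: t ∧ (b - 1) ∉ b :: t)
            from fun hm => hbn3 hm.1)]
      by_cases h3 : b - a = 3
      · rw [if_pos h3, if_pos (hb.mpr h3)]
        omega
      · rw [if_neg h3,
            if_neg (show ¬ ((b - 3) ∈ a :: b :: t ∧ (b - 2) ∉ a :: b :: t ∧ (b - 1) ∉ a :: b :: t)
              from fun hm => h3 (hb.mp hm))]
        omega

-- ===== VERDICT (by name: the statement is the Claim_ definition above) =====
theorem adaptor_combs_spec : Claim_equal_adaptor_combs := by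
  intro adaptors _
  unfold Spec_adaptor_combs adaptor_combs adaptor_combs_alt
  dsimp only
  set s := PySem.List.sorted ((adaptors ++ [0]) ++ [((PySem.List.max? (adaptors ++ [0]) (fun y => y)).getD 0) + 3]) (fun y => y) false with hs
  have hpw : s.Pairwise (· ≤ ·) := by
    simpa using PySem.List.sorted_pairwise ((adaptors ++ [0]) ++ [((PySem.List.max? (adaptors ++ [0]) (fun y => y)).getD 0) + 3]) (fun y => y)
  have hlt : (pvSD s).Pairwise (· < ·) := pvSD_pairwise_lt s hpw
  -- A's side: the diffs list is the adjacent-difference list, and its counts survive dedup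
  rw [diffs_eq_zip s]
  have hA3 : ((s.zip s.tail).map (fun ab => ab.2 - ab.1)).count 3 = pvAdjCount 3 (pvSD s) :=
    pvAdjCount_pvSD 3 (by norm_num) s hpw
  have hA1 : ((s.zip s.tail).map (fun ab => ab.2 - ab.1)).count 1 = pvAdjCount 1 (pvSD s) :=
    pvAdjCount_pvSD 1 (by norm_num) s hpw
  -- B's side: the set is a permutation of pvSD s, and contains-tests are membership in s
  have hnd : (pvSD s).Nodup := hlt.imp (fun h => ne_of_lt h)
  have hperm : (PySem.Set.ofList s).Perm (pvSD s) :=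
    (List.perm_ext_iff_of_nodup (PySem.Set.nodup_ofList s) hnd).mpr
      (fun x => by rw [PySem.Set.mem_ofList, pvSD_mem])
  have hcont : ∀ x : Int, PySem.Set.contains (PySem.Set.ofList s) x = decide (x ∈ pvSD s) := by
    intro x
    by_cases hx : x ∈ pvSD s
    · simp [hx, PySem.Set.mem_ofList, (pvSD_mem s x).mp hx]
    · have hns : ¬ x ∈ s := fun hm => hx ((pvSD_mem s x).mpr hm)
      simp only [hx, decide_false]
      rw [← Bool.not_eq_true, PySem.Set.contains_iff, PySem.Set.mem_ofList]
      exact hns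
  have hB1 : List.countP (fun v => PySem.Set.contains (PySem.Set.ofList s) (v - 1)) (PySem.Set.ofList s)
      = List.countP (fun v => decide ((v - 1) ∈ pvSD s)) (pvSD s) := by
    rw [hperm.countP_eq]
    exact List.countP_congr (fun v _ => by rw [hcont])
  have hB3 : List.countP (fun v => PySem.Set.contains (PySem.Set.ofList s) (v - 3)
        && !PySem.Set.contains (PySem.Set.ofList s) (v - 2)
        && !PySem.Set.contains (PySem.Set.ofList s) (v - 1)) (PySem.Set.ofList s)
      = List.countP (fun v => decide ((v - 3) ∈ pvSD s) && !decide ((v - 2) ∈ pvSD s)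
        && !decide ((v - 1) ∈ pvSD s)) (pvSD s) := by
    rw [hperm.countP_eq]
    exact List.countP_congr (fun v _ => by rw [hcont, hcont, hcont])
  rw [hA3, hA1, hB3, hB1, pvCount_one (pvSD s) hlt, pvCount_three (pvSD s) hlt]
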